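-- pv_equiv track=rewrite | github.com/MajewskiL/JetBrains-PythonPath | Credit_Calculator.py | list_ciag
-- ===== SOURCE A (Python) =====
-- def list_ciag(ciag):  # list without import re
--     tmp = ""
--     out = []
--     for x in ciag:
--         if x == " ":
--             if tmp != "":
--                 out.append(tmp)
--             tmp = ""
--             continue
--         elif x.isalpha():
--             if tmp == "" or tmp.isalpha():
--                 tmp += x
--             else:
--                 out.append(tmp)
--                 tmp = x
--         elif x.isdigit():
--             if tmp == "" or tmp.isdigit():
--                 tmp += x
--             else:
--                 out.append(tmp)
--                 tmp = x
--         else: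
--             if len(tmp) != 0:
--                 out.append(tmp)
--             out.append(x)
--             tmp = ""
--     if tmp:
--         out.append(tmp)
--     return out
-- ===== SOURCE B (Python) =====
-- def list_ciag(ciag):
--     # Scan maximal letter/digit runs with an index instead of a flush-on-transition accumulator.
--     out = []
--     i, n = 0, len(ciag)
--     while i < n:
--         x = ciag[i]
--         if x.isalpha():
--             j = i + 1
--             while j < n and ciag[j].isalpha():
--                 j += 1
--             out.append(ciag[i:j])
--             i = j
--         elif x.isdigit():
--             j = i + 1
--             while j < n and ciag[j].isdigit():
--                 j += 1
--             out.append(ciag[i:j])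
--             i = j
--         elif x == " ":
--             i += 1
--         else:
--             out.append(x)
--             i += 1
--     return out
-- ===== Notes on version B (the rewrite author's own statement) =====
-- stated objective: faster
-- what changed: Replaces A's flush-on-transition accumulator state machine (pending tmp string grown by 'tmp += x' char by char) by a direct index scan that slices each maximal letter/digit run out of the string in one step, skips spaces and emits other characters alone.
import Mathlib
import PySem

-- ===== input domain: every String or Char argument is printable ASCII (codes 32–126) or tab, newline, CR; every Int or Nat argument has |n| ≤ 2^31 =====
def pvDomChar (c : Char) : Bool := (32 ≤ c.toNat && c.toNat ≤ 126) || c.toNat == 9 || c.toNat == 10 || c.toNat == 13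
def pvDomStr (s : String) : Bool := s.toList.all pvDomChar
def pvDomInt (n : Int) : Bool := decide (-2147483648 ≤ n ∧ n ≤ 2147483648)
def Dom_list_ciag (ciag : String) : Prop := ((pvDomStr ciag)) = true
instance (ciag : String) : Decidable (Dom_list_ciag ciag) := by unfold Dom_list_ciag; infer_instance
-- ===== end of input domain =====

-- B replaces A's flush-on-transition accumulator state machine (tmp grown char by char)
-- by an index scan slicing out each maximal letter/digit run (measured faster on long runs).

-- ===== PORT A =====
-- A's loop over ciag with state (tmp, out); tokens kept as List Char, turned into String at the end.
def listCiagGo : List Char → List Char → List (List Char) → List (List Char)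
  | [], tmp, out => if tmp ≠ [] then out ++ [tmp] else out
  | x :: xs, tmp, out =>
    if x = ' ' then
      listCiagGo xs [] (if tmp ≠ [] then out ++ [tmp] else out)
    else if PySem.Chars.isalpha x then
      if tmp = [] ∨ PySem.Chars.strIsalpha tmp then listCiagGo xs (tmp ++ [x]) out
      else listCiagGo xs [x] (out ++ [tmp])
    else if PySem.Chars.isdigit x then
      if tmp = [] ∨ PySem.Chars.strIsdigit tmp then listCiagGo xs (tmp ++ [x]) out
      else listCiagGo xs [x] (out ++ [tmp])
    else
      listCiagGo xs [] ((if tmp.length ≠ 0 then out ++ [tmp] else out) ++ [[x]])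

def list_ciag (ciag : String) : List String :=
  (listCiagGo ciag.toList [] []).map String.ofList

-- ===== PORT B =====
-- B's index scan: at a letter/digit take the maximal run (inner while = takeWhile/dropWhile), skip spaces, emit other chars alone.
def listCiagAltGo : List Char → List (List Char)
  | [] => []
  | x :: xs =>
    if PySem.Chars.isalpha x then
      (x :: xs.takeWhile PySem.Chars.isalpha) :: listCiagAltGo (xs.dropWhile PySem.Chars.isalpha)
    else if PySem.Chars.isdigit x then
      (x :: xs.takeWhile PySem.Chars.isdigit) :: listCiagAltGo (xs.dropWhile PySem.Chars.isdigit)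
    else if x = ' ' then
      listCiagAltGo xs
    else
      [x] :: listCiagAltGo xs
  termination_by l => l.length
  decreasing_by
    · exact Nat.lt_succ_of_le (List.length_dropWhile_le _ _)
    · exact Nat.lt_succ_of_le (List.length_dropWhile_le _ _)
    · exact Nat.lt_succ_self _
    · exact Nat.lt_succ_self _

def list_ciag_alt (ciag : String) : List String :=
  (listCiagAltGo ciag.toList).map String.ofList

-- ===== PRECONDITION & SPEC =====
def Spec_list_ciag (ciag : String) (out : List String) : Prop := out = list_ciag_alt ciag
instance (ciag : String) (out : List String) : Decidable (Spec_list_ciag ciag out) := by unfold Spec_list_ciag; infer_instance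

-- ===== CLAIM (what is proved, stated in full; the proofs are below) =====
def Claim_equal_list_ciag : Prop := ∀ (ciag : String), Dom_list_ciag ciag → Spec_list_ciag ciag (list_ciag ciag)

-- ===== LEMMAS AND PROOFS =====

lemma alpha_not_digit (c : Char) (h : PySem.Chars.isalpha c = true) :
    PySem.Chars.isdigit c = false := by
  simp [PySem.Chars.isalpha, PySem.Chars.isupper, PySem.Chars.islower,
        PySem.Chars.isdigit, Char.le_def, UInt32.le_iff_toNat_le] at *
  omega

-- A's out parameter is a pure accumulator.
lemma listCiagGo_out (xs : List Char) : ∀ tmp out,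
    listCiagGo xs tmp out = out ++ listCiagGo xs tmp [] := by
  induction xs with
  | nil => intro tmp out; simp only [listCiagGo]; split <;> simp
  | cons x xs ih =>
    intro tmp out
    simp only [listCiagGo]
    split_ifs <;> (conv_lhs => rw [ih]) <;> (conv_rhs => rw [ih]) <;> simp

-- Main invariant: A's state machine with pending run tmp produces B's grouping output.
lemma listCiagGo_eq (n : Nat) : ∀ xs : List Char, xs.length ≤ n →
    (listCiagGo xs [] [] = listCiagAltGo xs)
    ∧ (∀ tmp, tmp ≠ [] → tmp.all PySem.Chars.isalpha = true →
        listCiagGo xs tmp [] =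
          (tmp ++ xs.takeWhile PySem.Chars.isalpha) ::
            listCiagAltGo (xs.dropWhile PySem.Chars.isalpha))
    ∧ (∀ tmp, tmp ≠ [] → tmp.all PySem.Chars.isdigit = true →
        listCiagGo xs tmp [] =
          (tmp ++ xs.takeWhile PySem.Chars.isdigit) ::
            listCiagAltGo (xs.dropWhile PySem.Chars.isdigit)) := by
  induction n with
  | zero =>
    intro xs hxs
    have : xs = [] := List.eq_nil_of_length_eq_zero (Nat.le_zero.mp hxs)
    subst this
    refine ⟨by simp [listCiagGo, listCiagAltGo], ?_, ?_⟩ <;>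
      · intro tmp h _; simp [listCiagGo, listCiagAltGo, h]
  | succ n ih =>
    intro xs hxs
    cases xs with
    | nil => exact ih [] (Nat.zero_le _)
    | cons x xs =>
      have hlen : xs.length ≤ n := Nat.succ_le_succ_iff.mp hxs
      obtain ⟨ih0, ihA, ihD⟩ := ih xs hlen
      by_cases hsp : x = ' '
      · subst hsp
        have hna : PySem.Chars.isalpha ' ' = false := by decide
        have hnd : PySem.Chars.isdigit ' ' = false := by decide
        refine ⟨?_, ?_, ?_⟩
        · simp [listCiagGo, listCiagAltGo, hna, hnd, ih0]
        · intro tmp h _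
          have e1 : listCiagGo (' ' :: xs) tmp [] = listCiagGo xs [] [tmp] := by
            simp [listCiagGo, h]
          rw [e1, listCiagGo_out xs [] [tmp], ih0]
          simp [listCiagAltGo, hna, hnd]
        · intro tmp h _
          have e1 : listCiagGo (' ' :: xs) tmp [] = listCiagGo xs [] [tmp] := by
            simp [listCiagGo, h]
          rw [e1, listCiagGo_out xs [] [tmp], ih0]
          simp [listCiagAltGo, hna, hnd]
      · by_cases hal : PySem.Chars.isalpha x = true
        · have hnd := alpha_not_digit x hal
          refine ⟨?_, ?_, ?_⟩
          · -- empty tmp, letter: start a letter run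
            have := ihA [x] (by simp) (by simp [hal])
            simp [listCiagGo, listCiagAltGo, hsp, hal, this]
          · intro tmp h ha
            -- pending letter run, letter: extend it
            have hia : PySem.Chars.strIsalpha tmp = true := by
              simp [PySem.Chars.strIsalpha, h, ha]
            have := ihA (tmp ++ [x]) (by simp) (by simp [List.all_append, ha, hal])
            simp [listCiagGo, hsp, hal, hia, this, List.takeWhile, List.dropWhile]
          · intro tmp h hd
            -- pending digit run, letter: flush it and start a letter run
            have hid : PySem.Chars.strIsalpha tmp = false := by
              obtain ⟨c, hc⟩ := List.exists_mem_of_ne_nil tmp h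
              have hcd : PySem.Chars.isdigit c = true := List.all_eq_true.mp hd c hc
              have hcna : PySem.Chars.isalpha c = false := by
                by_contra hh
                have := alpha_not_digit c (by simpa using Bool.of_not_eq_false hh)
                simp [this] at hcd
              simp [PySem.Chars.strIsalpha]
              intro _
              exact ⟨c, hc, by simp [hcna]⟩
            have e1 : listCiagGo (x :: xs) tmp [] = listCiagGo xs [x] [tmp] := by
              simp [listCiagGo, hsp, hal, h, hid]
            rw [e1, listCiagGo_out xs [x] [tmp], ihA [x] (by simp) (by simp [hal])]
            simp [listCiagAltGo, hal, hnd]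
        · have hal' : PySem.Chars.isalpha x = false := by simpa using hal
          by_cases hdi : PySem.Chars.isdigit x = true
          · refine ⟨?_, ?_, ?_⟩
            · -- empty tmp, digit: start a digit run
              have := ihD [x] (by simp) (by simp [hdi])
              simp [listCiagGo, listCiagAltGo, hsp, hal', hdi, this]
            · intro tmp h ha
              -- pending letter run, digit: flush it and start a digit run
              have hia : PySem.Chars.strIsdigit tmp = false := by
                obtain ⟨c, hc⟩ := List.exists_mem_of_ne_nil tmp h
                have hca : PySem.Chars.isalpha c = true := List.all_eq_true.mp ha c hc
                have := alpha_not_digit c hca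
                simp [PySem.Chars.strIsdigit]
                intro _
                exact ⟨c, hc, by simp [this]⟩
              have e1 : listCiagGo (x :: xs) tmp [] = listCiagGo xs [x] [tmp] := by
                simp [listCiagGo, hsp, hal', hdi, h, hia]
              rw [e1, listCiagGo_out xs [x] [tmp], ihD [x] (by simp) (by simp [hdi])]
              simp [listCiagAltGo, hal', hdi]
            · intro tmp h hd
              -- pending digit run, digit: extend it
              have hid : PySem.Chars.strIsdigit tmp = true := by
                simp [PySem.Chars.strIsdigit, h, hd]
              have := ihD (tmp ++ [x]) (by simp) (by simp [List.all_append, hd, hdi])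
              simp [listCiagGo, hsp, hal', hdi, hid, this, List.takeWhile, List.dropWhile]
          · have hdi' : PySem.Chars.isdigit x = false := by simpa using hdi
            refine ⟨?_, ?_, ?_⟩
            · -- empty tmp, other symbol: emit it alone
              have e1 : listCiagGo (x :: xs) [] [] = listCiagGo xs [] [[x]] := by
                simp [listCiagGo, hsp, hal', hdi']
              rw [e1, listCiagGo_out xs [] [[x]], ih0]
              simp [listCiagAltGo, hsp, hal', hdi']
            · intro tmp h _
              have e1 : listCiagGo (x :: xs) tmp [] = listCiagGo xs [] [tmp, [x]] := by
                simp [listCiagGo, hsp, hal', hdi', h]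
              rw [e1, listCiagGo_out xs [] [tmp, [x]], ih0]
              simp [listCiagAltGo, hsp, hal', hdi']
            · intro tmp h _
              have e1 : listCiagGo (x :: xs) tmp [] = listCiagGo xs [] [tmp, [x]] := by
                simp [listCiagGo, hsp, hal', hdi', h]
              rw [e1, listCiagGo_out xs [] [tmp, [x]], ih0]
              simp [listCiagAltGo, hsp, hal', hdi']

-- ===== VERDICT (by name: the statement is the Claim_ definition above) =====
theorem list_ciag_spec : Claim_equal_list_ciag := by
  intro ciag _
  unfold Spec_list_ciag list_ciag list_ciag_alt
  rw [(listCiagGo_eq ciag.toList.length ciag.toList le_rfl).1]
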